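-- pv_equiv track=rewrite | github.com/ogokdemir/DataMining2018 | A1/src/test.py | findCandidates1
-- ===== SOURCE A (Python) =====
-- def findCandidates1(dataset):
--     cands = []
--     for trans in dataset:
--         for item in trans:
--             if not [item] in cands:
--                 cands.append([item])
--
--     cands.sort()
--     #returning frozensets so that these itemsets can be used as the keys of a dictionary(a.k.a python hashtable).
--     return list(map(frozenset, cands))
-- ===== SOURCE B (Python) =====
-- def findCandidates1(dataset):
--     flat = []
--     for trans in dataset:
--         flat.extend(trans)
--     flat.sort()
--     uniq = []
--     prev = None
--     for x in flat:
--         if x != prev: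
--             uniq.append(x)
--             prev = x
--     return [frozenset({u}) for u in uniq]
-- ===== Notes on version B (the rewrite author's own statement) =====
-- stated objective: faster
-- what changed: Replaces A's nested loops with an O(U) membership scan of the growing candidate list per item (plus a sort of singleton lists) by flattening once, sorting the flat list once, and removing duplicates in a single adjacent-dedup pass that carries the previous element.
import Mathlib
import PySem

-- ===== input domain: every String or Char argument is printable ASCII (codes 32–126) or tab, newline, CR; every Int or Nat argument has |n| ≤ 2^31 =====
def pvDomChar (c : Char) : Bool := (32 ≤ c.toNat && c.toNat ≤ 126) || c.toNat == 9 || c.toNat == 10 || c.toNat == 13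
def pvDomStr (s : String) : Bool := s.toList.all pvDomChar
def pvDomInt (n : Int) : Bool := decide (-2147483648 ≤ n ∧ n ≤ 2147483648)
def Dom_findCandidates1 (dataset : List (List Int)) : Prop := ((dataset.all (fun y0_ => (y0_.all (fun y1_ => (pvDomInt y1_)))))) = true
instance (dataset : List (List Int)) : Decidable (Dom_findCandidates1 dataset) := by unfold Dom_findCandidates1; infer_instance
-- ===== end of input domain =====

-- B replaces A's quadratic membership scan over the growing candidate list by
-- flatten + one sort + one adjacent-dedup pass (faster in a timing run).

-- ===== PORT A =====
-- cands accumulates singleton lists, skipping those already present; then sort, then map frozenset.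
def findCandidates1 (dataset : List (List Int)) : List (List Int) :=
  let cands := dataset.foldl (fun cands trans =>
    trans.foldl (fun cands item =>
      if [item] ∈ cands then cands else cands ++ [[item]]) cands) []
  (PySem.List.sorted cands (fun l => l) false).map (fun l => PySem.Set.ofList l)

-- ===== PORT B =====
-- flatten (extend), sort once, single pass keeping x when it differs from prev, map frozenset({x}).
def findCandidates1_alt (dataset : List (List Int)) : List (List Int) :=
  let flat := dataset.foldl (fun acc trans => acc ++ trans) []
  let sortedFlat := PySem.List.sorted flat (fun x => x) false
  let st := sortedFlat.foldl
      (fun (st : List Int × Option Int) x =>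
        if some x ≠ st.2 then (st.1 ++ [x], some x) else st)
      (([] : List Int), (none : Option Int))
  st.1.map (fun u => PySem.Set.ofList [u])

-- ===== PRECONDITION & SPEC =====
def Spec_findCandidates1 (dataset : List (List Int)) (out : List (List Int)) : Prop := out = findCandidates1_alt dataset
instance (dataset : List (List Int)) (out : List (List Int)) : Decidable (Spec_findCandidates1 dataset out) := by unfold Spec_findCandidates1; infer_instance

-- ===== CLAIM (what is proved, stated in full; the proofs are below) =====
def Claim_equal_findCandidates1 : Prop := ∀ (dataset : List (List Int)), Dom_findCandidates1 dataset → Spec_findCandidates1 dataset (findCandidates1 dataset)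

-- ===== LEMMAS AND PROOFS =====

-- model of B's dedup loop: adjacent dedup with a "previous element" register
def dedupAdj (p : Option Int) : List Int → List Int
  | [] => []
  | x :: xs => if some x ≠ p then x :: dedupAdj (some x) xs else dedupAdj p xs

-- B's foldl computes dedupAdj
theorem foldlB (l : List Int) (u : List Int) (p : Option Int) :
    l.foldl (fun (st : List Int × Option Int) x =>
        if some x ≠ st.2 then (st.1 ++ [x], some x) else st) (u, p)
    = (u ++ dedupAdj p l, l.foldl (fun _ x => some x) p) := by
  induction l generalizing u p with
  | nil => simp [dedupAdj]
  | cons x xs ih =>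
    by_cases h : some x = p
    · subst h
      have e1 : dedupAdj (some x) (x :: xs) = dedupAdj (some x) xs := by simp [dedupAdj]
      rw [List.foldl_cons, if_neg (show ¬ some x ≠ (u, some x).2 by simp), e1, ih, List.foldl_cons]
    · have e1 : dedupAdj p (x :: xs) = x :: dedupAdj (some x) xs := by simp [dedupAdj, h]
      rw [List.foldl_cons, if_pos (show some x ≠ (u, p).2 by simpa using h), e1, ih, List.foldl_cons]
      simp

-- on a ≤-sorted list whose elements dominate p, dedupAdj is strictly increasing and
-- keeps exactly the elements different from p
theorem dedupAdj_spec (l : List Int) (p : Option Int)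
    (hs : l.Pairwise (· ≤ ·)) (hp : ∀ x ∈ l, ∀ y, p = some y → y ≤ x) :
    (dedupAdj p l).Pairwise (· < ·) ∧ ∀ x, (x ∈ dedupAdj p l ↔ x ∈ l ∧ p ≠ some x) := by
  induction l generalizing p with
  | nil => simp [dedupAdj]
  | cons a xs ih =>
    rcases List.pairwise_cons.mp hs with ⟨ha, hxs⟩
    by_cases h : some a = p
    · have hp' : ∀ x ∈ xs, ∀ y, p = some y → y ≤ x := by
        intro x hx y hy
        exact hp x (List.mem_cons_of_mem _ hx) y hy
      obtain ⟨h1, h2⟩ := ih p hxs hp'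
      refine ⟨by simpa [dedupAdj, h] using h1, fun x => ?_⟩
      rw [show dedupAdj p (a :: xs) = dedupAdj p xs by simp [dedupAdj, h], h2 x]
      constructor
      · rintro ⟨hx, hne⟩
        exact ⟨List.mem_cons_of_mem _ hx, hne⟩
      · rintro ⟨hx, hne⟩
        rcases List.mem_cons.mp hx with rfl | hx
        · exact absurd h.symm hne
        · exact ⟨hx, hne⟩
    · have hp' : ∀ x ∈ xs, ∀ y, (some a : Option Int) = some y → y ≤ x := by
        intro x hx y hy
        cases hy
        exact ha x hx
      obtain ⟨h1, h2⟩ := ih (some a) hxs hp'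
      have hD : dedupAdj p (a :: xs) = a :: dedupAdj (some a) xs := by simp [dedupAdj, h]
      constructor
      · rw [hD]
        refine List.pairwise_cons.mpr ⟨?_, h1⟩
        intro x hx
        obtain ⟨hx1, hx2⟩ := (h2 x).mp hx
        have : a ≤ x := ha x hx1
        have hne : x ≠ a := fun he => hx2 (by rw [he])
        omega
      · intro x
        rw [hD]
        constructor
        · intro hx
          rcases List.mem_cons.mp hx with rfl | hx
          · exact ⟨List.mem_cons_self, fun he => h he.symm⟩
          · obtain ⟨hx1, hx2⟩ := (h2 x).mp hx
            refine ⟨List.mem_cons_of_mem _ hx1, ?_⟩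
            intro he
            -- p = some x with x ∈ xs, x ≠ a; but p's value ≤ a ≤ x forces x = a
            have h1x : x ≤ a := hp a List.mem_cons_self x he
            have h2x : a ≤ x := ha x hx1
            have : x = a := le_antisymm h1x h2x
            exact hx2 (by rw [this])
        · rintro ⟨hx, hne⟩
          rcases List.mem_cons.mp hx with rfl | hx
          · exact List.mem_cons_self
          · by_cases hxa : x = a
            · subst hxa; exact List.mem_cons_self
            · refine List.mem_cons_of_mem _ ((h2 x).mpr ⟨hx, ?_⟩)
              intro he
              exact hxa (Option.some.inj he).symm

-- A's inner loop over one transaction, on a candidate list that is a mapped set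
theorem innerA (trans : List Int) (s : List Int) :
    trans.foldl (fun c item => if [item] ∈ c then c else c ++ [[item]])
      (s.map (fun x => [x]))
    = (trans.foldl PySem.Set.add s).map (fun x => [x]) := by
  induction trans generalizing s with
  | nil => rfl
  | cons a xs ih =>
    have hmem : ([a] ∈ s.map (fun x => [x])) ↔ a ∈ s := by
      simp
    by_cases h : a ∈ s
    · simp only [List.foldl_cons, if_pos (hmem.mpr h)]
      rw [show PySem.Set.add s a = s by simp [PySem.Set.add, h]]
      exact ih s
    · simp only [List.foldl_cons, if_neg (fun hc => h (hmem.mp hc))]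
      rw [show PySem.Set.add s a = s ++ [a] by simp [PySem.Set.add, h]]
      rw [show (List.map (fun x => [x]) s ++ [[a]]) = List.map (fun x => [x]) (s ++ [a]) by simp]
      exact ih (s ++ [a])

-- A's nested loops build the mapped first-occurrence set of the flattening
theorem outerA (dataset : List (List Int)) (s : List Int) :
    dataset.foldl (fun cands trans =>
      trans.foldl (fun cands item =>
        if [item] ∈ cands then cands else cands ++ [[item]]) cands)
      (s.map (fun x => [x]))
    = (dataset.foldl (fun s trans => trans.foldl PySem.Set.add s) s).map (fun x => [x]) := by
  induction dataset generalizing s with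
  | nil => rfl
  | cons t ds ih =>
    simp only [List.foldl_cons]
    rw [innerA t s]
    exact ih (t.foldl PySem.Set.add s)

-- folding Set.add over the per-transaction loops = folding it over the flattening
theorem foldAdd_flat (dataset : List (List Int)) (acc : List Int) (s : List Int) :
    (dataset.foldl (fun a t => a ++ t) acc).foldl PySem.Set.add s
    = dataset.foldl (fun s t => t.foldl PySem.Set.add s) (acc.foldl PySem.Set.add s) := by
  induction dataset generalizing acc s with
  | nil => rfl
  | cons t ds ih =>
    simp only [List.foldl_cons]
    rw [ih (acc ++ t) s, List.foldl_append]

theorem singleton_lt {a b : Int} (h : a < b) : ([a] : List Int) < [b] :=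
  List.Lex.rel h

-- ===== VERDICT (by name: the statement is the Claim_ definition above) =====
theorem findCandidates1_spec : Claim_equal_findCandidates1 := by
  intro dataset _
  unfold Spec_findCandidates1
  simp only [findCandidates1, findCandidates1_alt]
  set flat := dataset.foldl (fun acc trans => acc ++ trans) [] with hflat
  set sortedFlat := PySem.List.sorted flat (fun x => x) false with hsf
  -- B's kept elements
  set D := dedupAdj none sortedFlat with hD
  have hBfold := foldlB sortedFlat [] none
  -- characterise D
  have hsp : sortedFlat.Pairwise (· ≤ ·) := PySem.List.sorted_pairwise flat (fun x => x)
  obtain ⟨hDlt, hDmem⟩ := dedupAdj_spec sortedFlat none hsp (by intro x _ y hy; cases hy)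
  have hDmem' : ∀ x, x ∈ D ↔ x ∈ flat := by
    intro x
    rw [hDmem x]
    simp only [hsf, PySem.List.mem_sorted]
    simp
  have hDnodup : D.Nodup := hDlt.imp (fun h => ne_of_lt h)
  -- A's candidate list
  have hA : dataset.foldl (fun cands trans =>
      trans.foldl (fun cands item =>
        if [item] ∈ cands then cands else cands ++ [[item]]) cands) []
      = (PySem.Set.ofList flat).map (fun x => [x]) := by
    have h0 := outerA dataset []
    simp only [List.map_nil] at h0
    rw [h0, PySem.Set.ofList_eq_foldl, hflat, foldAdd_flat dataset [] []]
    rfl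
  rw [hA]
  -- the sorted candidate list is exactly D mapped to singletons
  have hperm : (D.map (fun x => [x])).Perm ((PySem.Set.ofList flat).map (fun x => [x])) := by
    refine List.Perm.map _ ?_
    refine (List.perm_ext_iff_of_nodup hDnodup (PySem.Set.nodup_ofList flat)).mpr ?_
    intro a
    rw [hDmem' a, PySem.Set.mem_ofList]
  have hpw : (D.map (fun x => [x])).Pairwise (fun a b => a < b) := by
    rw [List.pairwise_map]
    exact hDlt.imp (fun h => singleton_lt h)
  have hsortA : PySem.List.sorted ((PySem.Set.ofList flat).map (fun x => [x])) (fun l => l) false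
      = D.map (fun x => [x]) := by
    have e : @PySem.List.sorted (List ℤ) (List ℤ) List.instLT (fun a b => a.decidableLT b)
          ((PySem.Set.ofList flat).map (fun x => [x])) (fun l => l) false
        = @PySem.List.sorted (List ℤ) (List ℤ) List.instLinearOrder.toLT LinearOrder.toDecidableLT
          ((PySem.Set.ofList flat).map (fun x => [x])) (fun l => l) false := by
      congr 1
    rw [e]
    exact PySem.List.sorted_eq_of_perm_of_pairwise_lt _ _ (fun l => l) hperm hpw
  rw [hsortA, hBfold]
  simp only [List.nil_append, List.map_map]
  rfl
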